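-- pv_equiv track=rewrite | github.com/hoelzl/plc | src/plc/file_utils.py | split_into_possible_chunks
-- ===== SOURCE A (Python) =====
-- def split_into_possible_chunks(content: str) -> list[str]:
--     possible_chunks: list = []
--     current_chunk = ""
--     lines = content.splitlines(keepends=True)  # Keep original line endings
--
--     for line in lines:
--         if line.strip().startswith("# %%") or line.strip().startswith("// %%"):
--             if current_chunk:
--                 possible_chunks.append(current_chunk)
--             current_chunk = line
--         else:
--             current_chunk += line
--
--     if current_chunk:
--         possible_chunks.append(current_chunk)
--
--     return possible_chunks
-- ===== SOURCE B (Python) =====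
-- def split_into_possible_chunks(content: str) -> list[str]:
--     lines = content.splitlines(keepends=True)
--     bounds = [i for i, line in enumerate(lines)
--               if line.strip().startswith("# %%") or line.strip().startswith("// %%")]
--     cuts = [0] + bounds + [len(lines)]
--     result = []
--     for a, b in zip(cuts, cuts[1:]):
--         chunk = "".join(lines[a:b])
--         if chunk:
--             result.append(chunk)
--     return result
-- ===== Notes on version B (the rewrite author's own statement) =====
-- stated objective: alternative
-- what changed: Replaces A's single accumulator pass (grow current_chunk line by line, flush at each marker) with a two-pass decomposition: first compute the list of marker-line indices, then slice the line list between consecutive boundaries and join each slice, keeping only non-empty chunks.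
import Mathlib
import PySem

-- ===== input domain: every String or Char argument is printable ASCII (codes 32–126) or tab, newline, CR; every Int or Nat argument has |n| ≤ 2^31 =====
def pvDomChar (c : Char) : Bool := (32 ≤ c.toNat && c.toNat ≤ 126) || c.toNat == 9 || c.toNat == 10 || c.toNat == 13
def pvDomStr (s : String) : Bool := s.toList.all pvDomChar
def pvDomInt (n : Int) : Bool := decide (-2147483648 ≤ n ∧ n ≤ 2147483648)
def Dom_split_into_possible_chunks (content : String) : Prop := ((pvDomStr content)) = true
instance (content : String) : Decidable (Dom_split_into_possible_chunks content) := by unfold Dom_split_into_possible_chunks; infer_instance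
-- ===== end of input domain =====

-- B replaces A's single accumulator pass by a boundary-index table plus a slice-and-join
-- second pass (alternative decomposition, same cost).

-- ===== PORT A =====
-- content.splitlines(keepends=True), exact on Dom (only '\n', '\r', '\r\n' line breaks
-- occur in Dom; Python's extra break characters \v, \f, \x1c-\x1e, \x85, … are outside Dom).
-- Shared by both ports: both Pythons call the same builtin.
def pvSlk (acc : List Char) : List Char → List (List Char)
  | [] => if acc = [] then [] else [acc.reverse]
  | '\r' :: '\n' :: rest => (acc.reverse ++ ['\r', '\n']) :: pvSlk [] rest
  | '\n' :: rest => (acc.reverse ++ ['\n']) :: pvSlk [] rest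
  | '\r' :: rest => (acc.reverse ++ ['\r']) :: pvSlk [] rest
  | c :: rest => pvSlk (c :: acc) rest

-- line.strip().startswith("# %%") or line.strip().startswith("// %%")  (same test in A and B)
def pvMarker (line : List Char) : Bool :=
  PySem.Chars.startswith (PySem.Chars.strip line) ("# %%".toList) ||
  PySem.Chars.startswith (PySem.Chars.strip line) ("// %%".toList)

-- loop body of A: state = (possible_chunks, current_chunk)
def pvStepA (st : List (List Char) × List Char) (line : List Char) :
    List (List Char) × List Char :=
  if pvMarker line then
    (if st.2 ≠ [] then st.1 ++ [st.2] else st.1, line)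
  else
    (st.1, st.2 ++ line)

def split_into_possible_chunks (content : String) : List String :=
  let lines := pvSlk [] content.toList
  let r := lines.foldl pvStepA ([], [])
  (if r.2 ≠ [] then r.1 ++ [r.2] else r.1).map String.ofList

-- ===== PORT B =====
-- loop body of B: append "".join(lines[a:b]) if non-empty
def pvStepB (lines : List (List Char)) (acc : List (List Char)) (p : Int × Int) :
    List (List Char) :=
  let chunk := (PySem.List.slice lines (some p.1) (some p.2)).flatten
  if chunk ≠ [] then acc ++ [chunk] else acc

def split_into_possible_chunks_alt (content : String) : List String :=
  let lines := pvSlk [] content.toList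
  let bounds := (PySem.List.enumerate lines 0).filterMap
    (fun p => if pvMarker p.2 then some p.1 else none)
  let cuts : List Int := 0 :: bounds ++ [(lines.length : Int)]
  ((cuts.zip cuts.tail).foldl (pvStepB lines) []).map String.ofList

-- ===== PRECONDITION & SPEC =====
def Spec_split_into_possible_chunks (content : String) (out : List String) : Prop := out = split_into_possible_chunks_alt content
instance (content : String) (out : List String) : Decidable (Spec_split_into_possible_chunks content out) := by unfold Spec_split_into_possible_chunks; infer_instance

-- ===== CLAIM (what is proved, stated in full; the proofs are below) =====
def Claim_equal_split_into_possible_chunks : Prop := ∀ (content : String), Dom_split_into_possible_chunks content → Spec_split_into_possible_chunks content (split_into_possible_chunks content)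

-- ===== LEMMAS AND PROOFS =====

-- A's loop, in direct-recursion form: chunks produced from lines with pending chunk cur
def pvF : List (List Char) → List Char → List (List Char)
  | [], cur => if cur ≠ [] then [cur] else []
  | l :: ls, cur =>
    if pvMarker l then (if cur ≠ [] then cur :: pvF ls l else pvF ls l)
    else pvF ls (cur ++ l)

-- marker indices of lines, counted from s
def pvNbFrom (s : Nat) : List (List Char) → List Nat
  | [] => []
  | l :: ls => (if pvMarker l then [s] else []) ++ pvNbFrom (s + 1) ls

-- joined segments lines[a:b₁], lines[b₁:b₂], …, lines[b_k:]
def pvSegs (lines : List (List Char)) (a : Nat) : List Nat → List (List Char)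
  | [] => [((lines.drop a).take (lines.length - a)).flatten]
  | b :: B => ((lines.drop a).take (b - a)).flatten :: pvSegs lines b B

def pvNE : List (List Char) → List (List Char)
  | [] => []
  | c :: cs => if c ≠ [] then c :: pvNE cs else pvNE cs

def pvPrep (cur : List Char) : List (List Char) → List (List Char)
  | [] => [cur]
  | c :: cs => (cur ++ c) :: cs

lemma pvA_fold (lines : List (List Char)) : ∀ acc cur,
    (let r := lines.foldl pvStepA (acc, cur);
     if r.2 ≠ [] then r.1 ++ [r.2] else r.1) = acc ++ pvF lines cur := by
  induction lines with
  | nil => intro acc cur; simp only [List.foldl_nil, pvF]; split_ifs <;> simp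
  | cons l ls ih =>
    intro acc cur
    simp only [List.foldl_cons, pvStepA, pvF]
    by_cases h1 : pvMarker l <;> by_cases h2 : cur ≠ [] <;>
      simp [h1, h2, ih]

lemma pvNbFrom_shift (ls : List (List Char)) : ∀ s, pvNbFrom (s + 1) ls = (pvNbFrom s ls).map (· + 1) := by
  induction ls with
  | nil => intro s; simp [pvNbFrom]
  | cons l ls ih =>
    intro s
    simp only [pvNbFrom, List.map_append, ih (s + 1)]
    split_ifs <;> simp

lemma pvE (ls : List (List Char)) : ∀ s : Nat,
    (PySem.List.enumerate ls (s : Int)).filterMap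
      (fun p => if pvMarker p.2 then some p.1 else none)
    = (pvNbFrom s ls).map (fun n => (n : Int)) := by
  induction ls with
  | nil => intro s; simp [PySem.List.enumerate_nil, pvNbFrom]
  | cons l ls ih =>
    intro s
    rw [PySem.List.enumerate_cons]
    have hcast : (s : Int) + 1 = ((s + 1 : Nat) : Int) := by push_cast; ring
    simp only [List.filterMap_cons, pvNbFrom, hcast, ih (s + 1)]
    split_ifs <;> simp

lemma pvZ (lines : List (List Char)) : ∀ (B : List Nat) (a : Nat) (acc : List (List Char)),
    ((((a : Int) :: (B.map (fun n => (n : Int)) ++ [(lines.length : Int)]))).zip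
      (B.map (fun n => (n : Int)) ++ [(lines.length : Int)])).foldl (pvStepB lines) acc
    = acc ++ pvNE (pvSegs lines a B) := by
  intro B
  induction B with
  | nil =>
    intro a acc
    simp only [pvSegs, pvNE]
    by_cases h : ((lines.drop a).take (lines.length - a)).flatten = [] <;>
      simp [pvStepB, PySem.List.slice_natCast, h]
  | cons b B ih =>
    intro a acc
    have hz : (((a : Int) :: ((b :: B).map (fun n => (n : Int)) ++ [(lines.length : Int)])).zip
          ((b :: B).map (fun n => (n : Int)) ++ [(lines.length : Int)]))
        = ((a : Int), (b : Int)) :: (((b : Int) :: (B.map (fun n => (n : Int)) ++ [(lines.length : Int)])).zip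
          (B.map (fun n => (n : Int)) ++ [(lines.length : Int)])) := rfl
    rw [hz, List.foldl_cons, ih b]
    simp only [pvSegs, pvNE]
    by_cases h : ((lines.drop a).take (b - a)).flatten = [] <;>
      simp [pvStepB, PySem.List.slice_natCast, h]

lemma pvSegs_shift (l : List Char) (ls : List (List Char)) :
    ∀ (B : List Nat) (a : Nat), pvSegs (l :: ls) (a + 1) (B.map (· + 1)) = pvSegs ls a B := by
  intro B
  induction B with
  | nil =>
    intro a
    simp [pvSegs, List.drop_succ_cons, Nat.succ_sub_succ]
  | cons b B ih =>
    intro a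
    simp [pvSegs, List.drop_succ_cons, Nat.succ_sub_succ, ih b]

lemma pvSegs_cons (l : List Char) (ls : List (List Char)) :
    ∀ B : List Nat, pvSegs (l :: ls) 0 (B.map (· + 1)) = pvPrep l (pvSegs ls 0 B) := by
  intro B
  cases B with
  | nil =>
    simp [pvSegs, pvPrep, List.take_succ_cons]
  | cons b B =>
    simp only [List.map_cons, pvSegs, pvPrep, List.drop_zero, Nat.sub_zero,
      List.take_succ_cons, List.flatten_cons, pvSegs_shift l ls B b]

lemma pvSegs_ne (lines : List (List Char)) (a : Nat) (B : List Nat) :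
    pvSegs lines a B ≠ [] := by
  cases B <;> simp [pvSegs]

lemma pvR (l : List Char) (ls : List (List Char)) :
    pvSegs (l :: ls) 0 (pvNbFrom 0 (l :: ls))
    = (if pvMarker l then [([] : List Char)] else []) ++ pvPrep l (pvSegs ls 0 (pvNbFrom 0 ls)) := by
  have h1 : pvNbFrom (0 + 1) ls = (pvNbFrom 0 ls).map (· + 1) := pvNbFrom_shift ls 0
  simp only [pvNbFrom, h1]
  by_cases h : pvMarker l
  · simp only [h, if_pos, List.singleton_append, pvSegs, List.drop_zero, Nat.sub_zero,
      List.take_zero, List.flatten_nil, pvSegs_cons l ls]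
  · simp only [h, if_neg, Bool.false_eq_true, not_false_iff, List.nil_append,
      pvSegs_cons l ls]

lemma pvG (lines : List (List Char)) : ∀ cur,
    pvF lines cur = pvNE (pvPrep cur (pvSegs lines 0 (pvNbFrom 0 lines))) := by
  induction lines with
  | nil =>
    intro cur
    by_cases h : cur = [] <;> simp [pvF, pvNbFrom, pvSegs, pvPrep, pvNE, h]
  | cons l ls ih =>
    intro cur
    rw [pvR l ls]
    by_cases h : pvMarker l
    · by_cases hc : cur = [] <;> simp [pvF, h, hc, pvPrep, pvNE, ih l]
    · obtain ⟨c, cs, hs⟩ : ∃ c cs, pvSegs ls 0 (pvNbFrom 0 ls) = c :: cs := by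
        cases hs : pvSegs ls 0 (pvNbFrom 0 ls) with
        | nil => exact absurd hs (pvSegs_ne ls 0 _)
        | cons c cs => exact ⟨c, cs, rfl⟩
      simp only [pvF, h, Bool.false_eq_true, if_neg, not_false_iff, List.nil_append, hs,
        pvPrep, ih (cur ++ l), List.append_assoc]

-- ===== VERDICT (by name: the statement is the Claim_ definition above) =====
theorem split_into_possible_chunks_spec : Claim_equal_split_into_possible_chunks := by
  intro content _
  unfold Spec_split_into_possible_chunks split_into_possible_chunks split_into_possible_chunks_alt
  simp only []
  set lines := pvSlk [] content.toList with hl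
  congr 1
  have hA := pvA_fold lines [] []
  simp only [List.nil_append] at hA
  rw [hA]
  have hE := pvE lines 0
  simp only [Nat.cast_zero] at hE
  rw [hE]
  have hZ := pvZ lines (pvNbFrom 0 lines) 0 []
  simp only [Nat.cast_zero, List.nil_append] at hZ
  simp only [List.cons_append, List.tail_cons]
  rw [hZ]
  rw [pvG lines []]
  obtain ⟨c, cs, hs⟩ : ∃ c cs, pvSegs lines 0 (pvNbFrom 0 lines) = c :: cs := by
    cases hs : pvSegs lines 0 (pvNbFrom 0 lines) with
    | nil => exact absurd hs (pvSegs_ne lines 0 _)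
    | cons c cs => exact ⟨c, cs, rfl⟩
  rw [hs]
  simp [pvPrep]
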